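-- pv_equiv track=rewrite | github.com/affablebloke/Tic-Tac-Toe | apps/api/game_logic.py | bitmask_to_board_position
-- ===== SOURCE A (Python) =====
-- def bitmask_to_board_position(bitmask):
--     """
--     |  A |  B |  C |
--     ----------------
--     |{a1}|{b1}|{c1}|
--     |{a2}|{b2}|{c2}|
--     |{a3}|{b3}|{c3}|
--
--     :param bitmask: A bitmask converted into a board position. IE 0b000000001 -> 'c3'
--     :return: A board position string
--     """
--     iter_bitmask = 0b000000001
--     prefix = 'a'
--     for i in range(1, 10):
--         if bitmask == iter_bitmask:
--             col = i % 3
--             if col == 0: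
--                 prefix = 'a'
--             elif col == 1:
--                 prefix = 'c'
--             elif col == 2:
--                 prefix = 'b'
--
--             row = 3
--             if bitmask > 0b000100000:
--                 row = 1
--             elif bitmask > 0b000000100:
--                 row = 2
--
--             return "{0}{1}".format(prefix, row)
--
--         iter_bitmask <<= 1
--
--     return None
-- ===== SOURCE B (Python) =====
-- _TABLE = {1: 'c3', 2: 'b3', 4: 'a3', 8: 'c2', 16: 'b2', 32: 'a2',
--           64: 'c1', 128: 'b1', 256: 'a1'}
--
--
-- def bitmask_to_board_position(bitmask):
--     """Direct table lookup of the single-bit mask; None for anything else."""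
--     return _TABLE.get(bitmask)
-- ===== Notes on version B (the rewrite author's own statement) =====
-- stated objective: simpler
-- what changed: Replaced the shifting loop with its nested column/row branch cascades by a single constant dict lookup returning the position string directly.
import Mathlib
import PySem

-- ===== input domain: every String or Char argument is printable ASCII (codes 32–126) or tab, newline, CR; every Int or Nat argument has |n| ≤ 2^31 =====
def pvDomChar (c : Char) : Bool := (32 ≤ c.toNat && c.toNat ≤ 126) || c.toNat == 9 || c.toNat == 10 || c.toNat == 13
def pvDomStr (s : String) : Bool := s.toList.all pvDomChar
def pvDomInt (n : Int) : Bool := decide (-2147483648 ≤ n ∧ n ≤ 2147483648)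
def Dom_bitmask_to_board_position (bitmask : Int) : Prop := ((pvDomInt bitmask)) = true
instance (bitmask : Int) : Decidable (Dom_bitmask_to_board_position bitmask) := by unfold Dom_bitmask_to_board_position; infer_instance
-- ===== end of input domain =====

-- B replaces A's shifting loop and branch cascades by one constant table lookup (simpler).

-- ===== PORT A =====
-- the body of A's for-loop: scan i over the range while doubling iter_bitmask
def pvALoop (bitmask : Int) : List Int → Int → Option String
  | [], _ => none
  | i :: rest, iter =>
    if bitmask = iter then
      let col := PySem.Int.mod i 3
      let pfx := if col = 0 then "a" else if col = 1 then "c" else if col = 2 then "b" else "a"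
      let row : Int := if bitmask > 32 then 1 else if bitmask > 4 then 2 else 3
      some (pfx ++ PySem.Int.toStr row)
    else pvALoop bitmask rest (iter * 2)

def bitmask_to_board_position (bitmask : Int) : Option String :=
  pvALoop bitmask (PySem.List.pyRange 1 10 1) 1

-- ===== PORT B =====
def pvTable : PySem.Dict Int String :=
  PySem.Dict.ofList
    [(1, "c3"), (2, "b3"), (4, "a3"), (8, "c2"), (16, "b2"), (32, "a2"),
     (64, "c1"), (128, "b1"), (256, "a1")]

def bitmask_to_board_position_alt (bitmask : Int) : Option String :=
  PySem.Dict.get? pvTable bitmask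

-- ===== PRECONDITION & SPEC =====
def Spec_bitmask_to_board_position (bitmask : Int) (out : Option String) : Prop := out = bitmask_to_board_position_alt bitmask
instance (bitmask : Int) (out : Option String) : Decidable (Spec_bitmask_to_board_position bitmask out) := by unfold Spec_bitmask_to_board_position; infer_instance

-- ===== CLAIM (what is proved, stated in full; the proofs are below) =====
def Claim_equal_bitmask_to_board_position : Prop := ∀ (bitmask : Int), Dom_bitmask_to_board_position bitmask → Spec_bitmask_to_board_position bitmask (bitmask_to_board_position bitmask)

-- ===== LEMMAS AND PROOFS =====
theorem pvRange_eval : PySem.List.pyRange 1 10 1 = [1,2,3,4,5,6,7,8,9] := by decide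

theorem pvTable_eval : pvTable = PySem.Dict.mk
    [(1, "c3"), (2, "b3"), (4, "a3"), (8, "c2"), (16, "b2"), (32, "a2"),
     (64, "c1"), (128, "b1"), (256, "a1")] := by decide

-- ===== VERDICT (by name: the statement is the Claim_ definition above) =====
theorem bitmask_to_board_position_spec : Claim_equal_bitmask_to_board_position := by
  intro b _
  unfold Spec_bitmask_to_board_position bitmask_to_board_position bitmask_to_board_position_alt
  rw [pvRange_eval]
  by_cases h1 : b = 1; · subst h1; rw [pvTable_eval]; decide
  by_cases h2 : b = 2; · subst h2; rw [pvTable_eval]; decide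
  by_cases h3 : b = 4; · subst h3; rw [pvTable_eval]; decide
  by_cases h4 : b = 8; · subst h4; rw [pvTable_eval]; decide
  by_cases h5 : b = 16; · subst h5; rw [pvTable_eval]; decide
  by_cases h6 : b = 32; · subst h6; rw [pvTable_eval]; decide
  by_cases h7 : b = 64; · subst h7; rw [pvTable_eval]; decide
  by_cases h8 : b = 128; · subst h8; rw [pvTable_eval]; decide
  by_cases h9 : b = 256; · subst h9; rw [pvTable_eval]; decide
  rw [pvTable_eval]
  simp [pvALoop, PySem.Dict.get?_mk_cons, h1, h2, h3, h4, h5, h6, h7, h8, h9]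
  rw [if_neg (fun h => h1 h.symm), if_neg (fun h => h2 h.symm), if_neg (fun h => h3 h.symm),
      if_neg (fun h => h4 h.symm), if_neg (fun h => h5 h.symm), if_neg (fun h => h6 h.symm),
      if_neg (fun h => h7 h.symm), if_neg (fun h => h8 h.symm), if_neg (fun h => h9 h.symm)]
  simp [PySem.Dict.get?]
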